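-- pv_equiv track=rewrite | github.com/DevilishSasuke/car_plate_recognition | utils.py | make_replacements
-- ===== SOURCE A (Python) =====
-- replacements = {
--     "0": "O", "8": "B", "2": "Z",
--   }
--
-- def make_replacements(text: str) -> str:
--   letters = text[0] + text[4:6]
--   numbers = text[1:4]
--   region = text[6:] if len(text) > 6 else ""
--
--   for k, v in replacements.items():
--     letters = letters.replace(k, v)
--     numbers = numbers.replace(v, k)
--     region = region.replace(v, k)
--
--   return f"{letters[0]}{numbers}{letters[1:]} {region}"
-- ===== SOURCE B (Python) =====
-- # B: single indexed pass with per-character substitution instead of slicing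
-- # into three fields and running three whole-string .replace scans per field.
--
-- def _to_letter(c):
--     if c == "0": return "O"
--     if c == "8": return "B"
--     if c == "2": return "Z"
--     return c
--
-- def _to_digit(c):
--     if c == "O": return "0"
--     if c == "B": return "8"
--     if c == "Z": return "2"
--     return c
--
-- def make_replacements(text: str) -> str:
--     out = []
--     for i, c in enumerate(text):
--         out.append(_to_letter(c) if i in (0, 4, 5) else _to_digit(c))
--     return "".join(out[:6]) + " " + "".join(out[6:])
-- ===== Notes on version B (the rewrite author's own statement) =====
-- stated objective: simpler
-- what changed: B makes one indexed pass over the characters, substituting each by position (digit->letter at indices 0,4,5; letter->digit elsewhere) and inserting the space after position 6, instead of A's slicing into three fields and running three whole-string .replace scans over each field.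
import Mathlib
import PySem

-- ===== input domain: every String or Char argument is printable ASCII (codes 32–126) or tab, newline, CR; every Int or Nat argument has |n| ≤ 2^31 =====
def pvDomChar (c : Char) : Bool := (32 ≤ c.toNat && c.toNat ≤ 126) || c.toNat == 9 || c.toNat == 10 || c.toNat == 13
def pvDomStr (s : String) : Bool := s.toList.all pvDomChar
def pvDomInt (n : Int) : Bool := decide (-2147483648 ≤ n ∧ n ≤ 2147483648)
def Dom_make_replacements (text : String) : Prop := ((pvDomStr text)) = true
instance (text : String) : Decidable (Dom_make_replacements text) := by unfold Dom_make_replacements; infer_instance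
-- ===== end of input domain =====

-- B replaces A's three-field slicing plus three whole-string .replace scans per
-- field by a single indexed pass with per-character substitution (objective:
-- simpler; equivalence on nonempty input is proved below).

-- ===== PORT A =====
-- module-level constant `replacements` (a dict, iterated in insertion order)
def pvReplacements : List (String × String) := [("0", "O"), ("8", "B"), ("2", "Z")]

def make_replacements (text : String) : String :=
  let t := text.toList
  match PySem.List.pyGet? t 0 with
  | none => ""    -- Python raises IndexError here (text = ""); excluded by Pre_
  | some c0 =>
    let letters : List Char := [c0] ++ PySem.List.slice t (some 4) (some 6)
    let numbers : List Char := PySem.List.slice t (some 1) (some 4)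
    let region : List Char := if t.length > 6 then PySem.List.slice t (some 6) none else []
    let st := pvReplacements.foldl
      (fun (st : List Char × List Char × List Char) kv =>
        (PySem.Chars.replace st.1 kv.1.toList kv.2.toList,
         PySem.Chars.replace st.2.1 kv.2.toList kv.1.toList,
         PySem.Chars.replace st.2.2 kv.2.toList kv.1.toList))
      (letters, numbers, region)
    match PySem.List.pyGet? st.1 0 with
    | none => ""  -- unreachable: letters is nonempty
    | some h =>
      String.ofList ([h] ++ st.2.1 ++ PySem.List.slice st.1 (some 1) none ++ [' '] ++ st.2.2)

-- ===== PORT B =====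
def pvToLetter (c : Char) : Char :=
  if c = '0' then 'O' else if c = '8' then 'B' else if c = '2' then 'Z' else c

def pvToDigit (c : Char) : Char :=
  if c = 'O' then '0' else if c = 'B' then '8' else if c = 'Z' then '2' else c

def make_replacements_alt (text : String) : String :=
  let out := (PySem.List.enumerate text.toList 0).foldl
    (fun (acc : List Char) ic =>
      acc ++ [if ic.1 = 0 ∨ ic.1 = 4 ∨ ic.1 = 5 then pvToLetter ic.2 else pvToDigit ic.2]) []
  String.ofList (out.take 6 ++ [' '] ++ out.drop 6)

-- ===== PRECONDITION & SPEC =====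
-- Pre_ excludes only the empty string, on which A raises IndexError (text[0]).
def Pre_make_replacements (text : String) : Prop := text ≠ ""
instance (text : String) : Decidable (Pre_make_replacements text) := by
  unfold Pre_make_replacements; infer_instance

def pvWitness_make_replacements : String := "A123BC77"

def Spec_make_replacements (text : String) (out : String) : Prop := out = make_replacements_alt text
instance (text : String) (out : String) : Decidable (Spec_make_replacements text out) := by
  unfold Spec_make_replacements; infer_instance

-- ===== CLAIM (what is proved, stated in full; the proofs are below) =====
def Claim_equal_make_replacements : Prop := ∀ (text : String), Dom_make_replacements text → Pre_make_replacements text → Spec_make_replacements text (make_replacements text)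

-- ===== LEMMAS AND PROOFS =====

-- replacing a single-character pattern by a single character is a per-char map
theorem replace_go_single (a b : Char) :
    ∀ (fuel : Nat) (l acc : List Char), l.length ≤ fuel →
      PySem.Chars.replace.go [a] [b] fuel l acc
        = acc.reverse ++ l.map (fun c => if c = a then b else c) := by
  intro fuel
  induction fuel with
  | zero =>
    intro l acc h
    have : l = [] := List.eq_nil_of_length_eq_zero (Nat.le_zero.mp h)
    subst this
    simp [PySem.Chars.replace.go]
  | succ n ih =>
    intro l acc h
    cases l with
    | nil => simp [PySem.Chars.replace.go]
    | cons c t =>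
      by_cases hc : c = a
      · subst hc
        have hp : List.isPrefixOf [c] (c :: t) = true := by
          simp [List.isPrefixOf]
        simp only [PySem.Chars.replace.go, hp, if_pos]
        rw [ih _ _ (by simpa using Nat.le_of_succ_le_succ h)]
        simp
      · have hp : List.isPrefixOf [a] (c :: t) = false := by
          simp only [List.isPrefixOf, Bool.and_eq_false_iff, beq_eq_false_iff_ne, ne_eq]
          exact Or.inl fun h2 => hc h2.symm
        simp only [PySem.Chars.replace.go, hp, Bool.false_eq_true, if_false]
        rw [ih _ _ (by simpa using Nat.le_of_succ_le_succ h)]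
        simp [hc]

theorem replace_single (a b : Char) (l : List Char) :
    PySem.Chars.replace l [a] [b] = l.map (fun c => if c = a then b else c) := by
  simp [PySem.Chars.replace]
  simpa using replace_go_single a b l.length l [] (le_refl _)

-- A's three sequential letter-direction replaces are one map with pvToLetter
theorem three_replaces_letter (l : List Char) :
    PySem.Chars.replace (PySem.Chars.replace (PySem.Chars.replace l ['0'] ['O']) ['8'] ['B']) ['2'] ['Z']
      = l.map pvToLetter := by
  simp only [replace_single, List.map_map]
  apply List.map_congr_left
  intro c _
  simp only [Function.comp, pvToLetter]
  split_ifs <;> simp_all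

-- A's three sequential digit-direction replaces are one map with pvToDigit
theorem three_replaces_digit (l : List Char) :
    PySem.Chars.replace (PySem.Chars.replace (PySem.Chars.replace l ['O'] ['0']) ['B'] ['8']) ['Z'] ['2']
      = l.map pvToDigit := by
  simp only [replace_single, List.map_map]
  apply List.map_congr_left
  intro c _
  simp only [Function.comp, pvToDigit]
  split_ifs <;> simp_all

-- from index ≥ 6 on, B's per-char substitution is pvToDigit
theorem enumerate_map_high (l : List Char) :
    ∀ (n : Int), 6 ≤ n →
    (PySem.List.enumerate l n).map (fun ic => if ic.1 = 0 ∨ ic.1 = 4 ∨ ic.1 = 5 then pvToLetter ic.2 else pvToDigit ic.2)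
      = l.map pvToDigit := by
  induction l with
  | nil => intro n _; simp [PySem.List.enumerate_nil]
  | cons c t ih =>
    intro n hn
    rw [PySem.List.enumerate_cons]
    simp only [List.map_cons]
    rw [ih (n + 1) (by omega)]
    have : ¬ (n = 0 ∨ n = 4 ∨ n = 5) := by omega
    simp [this]

theorem enumerate_map_six (l : List Char) :
    (PySem.List.enumerate l 6).map (fun ic => if ic.1 = 0 ∨ ic.1 = 4 ∨ ic.1 = 5 then pvToLetter ic.2 else pvToDigit ic.2)
      = l.map pvToDigit := enumerate_map_high l 6 (by norm_num)

theorem flatten_map_singleton {α β : Type} (g : α → β) (l : List α) :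
    (l.map (fun x => [g x])).flatten = l.map g := by
  induction l with
  | nil => rfl
  | cons x xs ih => simp [ih]

theorem enumerate_flat_six (l : List Char) :
    (List.map (fun x2 => [if x2.1 = 0 ∨ x2.1 = 4 ∨ x2.1 = 5 then pvToLetter x2.2 else pvToDigit x2.2])
        (PySem.List.enumerate l 6)).flatten = List.map pvToDigit l := by
  rw [flatten_map_singleton, enumerate_map_six]

-- ===== VERDICT (by name: the statement is the Claim_ definition above) =====
theorem make_replacements_spec : Claim_equal_make_replacements := by
  intro text _ hpre
  unfold Spec_make_replacements make_replacements make_replacements_alt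
  have hne : text.toList ≠ [] := by
    intro h
    apply hpre
    have h2 := congrArg String.ofList h
    simpa using h2
  obtain ⟨c0, t, ht⟩ := List.exists_cons_of_ne_nil hne
  rw [ht]
  rcases t with _ | ⟨b, _ | ⟨c, _ | ⟨d, _ | ⟨e, _ | ⟨f, rest⟩⟩⟩⟩⟩
  case nil | cons.nil | cons.cons.nil | cons.cons.cons.nil | cons.cons.cons.cons.nil =>
    simp [PySem.List.slice, PySem.List.pyGet?, PySem.List.pyIdx?,
      pvReplacements, List.foldl, three_replaces_letter, three_replaces_digit,
      PySem.List.enumerate_cons, PySem.List.enumerate_nil,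
      pvToLetter, pvToDigit]
  case cons.cons.cons.cons.cons =>
    have h0 : (0:Int) ≤ (rest.length:Int) + 1 + 1 + 1 + 1 + 1 := by positivity
    by_cases hr : rest = []
    · subst hr
      simp [PySem.List.slice, PySem.List.pyGet?, PySem.List.pyIdx?,
        pvReplacements, List.foldl, three_replaces_letter, three_replaces_digit,
        PySem.List.enumerate_cons, PySem.List.enumerate_nil,
        pvToLetter, pvToDigit]
    · have hr' : 0 < rest.length := List.length_pos_iff.mpr hr
      simp [PySem.List.slice, PySem.List.pyGet?, PySem.List.pyIdx?, h0, hr',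
        pvReplacements, List.foldl, three_replaces_letter, three_replaces_digit,
        PySem.List.enumerate_cons, enumerate_flat_six]
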